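-- pv_equiv track=rewrite | github.com/chenhh/Uva | uva_11683.py | laser_count
-- ===== SOURCE A (Python) =====
-- def laser_count(height, length, shapes):
--     """ O(n^2), correct but TLE """
--     # shape: length
--     count = 0
--     for level in reversed(range(1, height + 1)):
--         # product shape of each level
--         blocks = [True] * length
--         for idx, shape in enumerate(shapes):
--             if shape >= level:
--                 blocks[idx] = False
--         # print (level, blocks)
--         blocks.append(False)
--         for jdx in range(length):
--             if blocks[jdx] == True and blocks[jdx + 1] == False:
--                 count += 1
--     return count
-- ===== SOURCE B (Python) =====
-- def laser_count(height, length, shapes):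
--     """O(length) one pass: for each column j, the lasers stopped at the step
--     between column j and its right neighbour are the levels strictly between
--     shape[j] and the neighbour's shape (clamped to [0, height])."""
--     if height <= 0 or length <= 0:
--         return 0
--     eff = [shapes[j] if j < len(shapes) else 0 for j in range(length)]
--     total = 0
--     for j in range(length):
--         nxt = eff[j + 1] if j + 1 < length else height
--         total += max(0, min(nxt, height) - max(eff[j], 0))
--     return total
-- ===== Notes on version B (the rewrite author's own statement) =====
-- stated objective: faster
-- what changed: Instead of rebuilding the wall's boolean profile and scanning it for every laser level (height passes over length columns), B sums per column the number of levels strictly between its shape and its right neighbour's, max(0, min(next, height) - max(shape, 0)), in a single pass over the columns.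
import Mathlib
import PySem

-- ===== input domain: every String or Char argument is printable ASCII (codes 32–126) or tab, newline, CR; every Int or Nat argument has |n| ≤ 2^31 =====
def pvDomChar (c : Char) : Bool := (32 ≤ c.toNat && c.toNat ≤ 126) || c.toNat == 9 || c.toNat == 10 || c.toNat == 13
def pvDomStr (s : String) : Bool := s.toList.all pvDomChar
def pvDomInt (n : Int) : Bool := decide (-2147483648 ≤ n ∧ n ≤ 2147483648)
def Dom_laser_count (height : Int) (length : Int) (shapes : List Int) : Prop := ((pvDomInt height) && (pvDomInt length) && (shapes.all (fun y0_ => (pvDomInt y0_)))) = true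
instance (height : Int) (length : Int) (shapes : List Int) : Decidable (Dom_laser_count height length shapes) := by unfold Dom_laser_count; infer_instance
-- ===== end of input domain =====

-- B replaces A's per-level rebuild-and-scan of the wall profile by a single pass over the
-- columns summing max(0, min(next, height) - max(shape, 0)): objective = faster (asymptotic).

-- ===== PORT A =====
-- one level's `blocks` list before the append of False
def laserBlocks (length : Int) (shapes : List Int) (level : Int) : List Bool :=
  (PySem.List.enumerate shapes 0).foldl
    (fun b p => if p.2 ≥ level then PySem.List.pySetD b p.1 false else b)
    (List.replicate length.toNat true)

def laser_count (height : Int) (length : Int) (shapes : List Int) : Int :=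
  (PySem.List.pyRange 1 (height + 1) 1).reverse.foldl
    (fun count level =>
      let blocks := laserBlocks length shapes level ++ [false]
      (PySem.List.pyRange 0 length 1).foldl
        (fun c jdx =>
          if PySem.List.pyGetD blocks jdx false = true ∧
             PySem.List.pyGetD blocks (jdx + 1) false = false
          then c + 1 else c)
        count)
    0

-- ===== PORT B =====
def laser_count_alt (height : Int) (length : Int) (shapes : List Int) : Int :=
  if height ≤ 0 ∨ length ≤ 0 then 0
  else
    let eff := (PySem.List.pyRange 0 length 1).map
      (fun j => if j < (shapes.length : Int) then PySem.List.pyGetD shapes j 0 else 0)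
    (PySem.List.pyRange 0 length 1).foldl
      (fun total j =>
        let nxt := if j + 1 < length then PySem.List.pyGetD eff (j + 1) 0 else height
        total + max 0 (min nxt height - max (PySem.List.pyGetD eff j 0) 0))
      0

-- ===== PRECONDITION & SPEC =====
-- Pre_ excludes exactly the inputs on which A raises IndexError: height ≥ 1 together with a
-- shapes entry ≥ 1 at an index ≥ length (the write blocks[idx] = False goes past the list).
def Pre_laser_count (height : Int) (length : Int) (shapes : List Int) : Prop :=
  height ≤ 0 ∨ ∀ x ∈ shapes.drop length.toNat, x ≤ 0

instance (height : Int) (length : Int) (shapes : List Int) : Decidable (Pre_laser_count height length shapes) := by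
  unfold Pre_laser_count; infer_instance

def pvWitness_laser_count : Int × Int × List Int := (3, 4, [1, 2, 3])

def Spec_laser_count (height : Int) (length : Int) (shapes : List Int) (out : Int) : Prop := out = laser_count_alt height length shapes
instance (height : Int) (length : Int) (shapes : List Int) (out : Int) : Decidable (Spec_laser_count height length shapes out) := by unfold Spec_laser_count; infer_instance

-- ===== CLAIM (what is proved, stated in full; the proofs are below) =====
def Claim_equal_laser_count : Prop := ∀ (height : Int) (length : Int) (shapes : List Int), Dom_laser_count height length shapes → Pre_laser_count height length shapes → Spec_laser_count height length shapes (laser_count height length shapes)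

-- ===== LEMMAS AND PROOFS =====

-- effective shape of column j (missing entries count as 0)
def eSh (shapes : List Int) (j : Nat) : Int := if h : j < shapes.length then shapes[j] else 0

-- effective shape of the right neighbour of column j (the wall edge counts as height)
def nSh (height : Int) (L : Nat) (shapes : List Int) (j : Nat) : Int :=
  if j + 1 < L then eSh shapes (j + 1) else height

-- the common closed form both ports are reduced to
def lcTarget (height : Int) (length : Int) (shapes : List Int) : Int :=
  ∑ j ∈ Finset.range length.toNat,
    max 0 (min (nSh height length.toNat shapes j) height - max (eSh shapes j) 0)

lemma foldSet_length (level : Int) (xs : List Int) : ∀ (s : Int) (b : List Bool),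
    ((PySem.List.enumerate xs s).foldl
      (fun b p => if p.2 ≥ level then PySem.List.pySetD b p.1 false else b) b).length = b.length := by
  induction xs with
  | nil => intro s b; simp [PySem.List.enumerate_nil]
  | cons x xs ih =>
    intro s b
    rw [PySem.List.enumerate_cons, List.foldl_cons, ih]
    split <;> simp [PySem.List.length_pySetD]

lemma foldSet_get (level : Int) (xs : List Int) : ∀ (n : Nat) (b : List Bool) (j : Nat),
    ((PySem.List.enumerate xs (n : Int)).foldl
      (fun b p => if p.2 ≥ level then PySem.List.pySetD b p.1 false else b) b)[j]? =
    if n ≤ j ∧ j - n < xs.length ∧ level ≤ xs.getD (j - n) 0 then (b.set j false)[j]?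
    else b[j]? := by
  induction xs with
  | nil =>
    intro n b j
    rw [PySem.List.enumerate_nil, List.foldl_nil, if_neg]
    rintro ⟨-, h2, -⟩
    simp at h2
  | cons x xs ih =>
    intro n b j
    rw [PySem.List.enumerate_cons, List.foldl_cons]
    have hcast : (n : Int) + 1 = ((n + 1 : Nat) : Int) := by push_cast; ring
    by_cases hx : x ≥ level
    · rw [if_pos hx, hcast, PySem.List.pySetD_natCast, ih (n + 1) (b.set n false) j]
      by_cases hj : j = n
      · subst hj
        rw [if_neg (by omega), if_pos ⟨Nat.le_refl _, by simp,
          by simp only [Nat.sub_self, List.getD_cons_zero]; exact hx⟩]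
      · by_cases hle : n + 1 ≤ j
        · have h1 : j - n = (j - (n + 1)) + 1 := by omega
          rw [h1, List.getD_cons_succ]
          by_cases hc : j - (n + 1) < xs.length ∧ level ≤ xs.getD (j - (n + 1)) 0
          · rw [if_pos ⟨hle, hc.1, hc.2⟩,
              if_pos ⟨by omega, by simp only [List.length_cons]; omega, hc.2⟩]
            simp [List.getElem?_set]
          · have hr : ¬ (n ≤ j ∧ j - (n + 1) + 1 < (x :: xs).length ∧
                level ≤ xs.getD (j - (n + 1)) 0) := by
              rintro ⟨-, hb, hcc⟩
              simp only [List.length_cons] at hb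
              exact hc ⟨by omega, hcc⟩
            rw [if_neg (fun h => hc ⟨h.2.1, h.2.2⟩), if_neg hr]
            exact List.getElem?_set_ne (by omega)
        · rw [if_neg (fun h => hle (by omega)), if_neg (fun h => hle (by omega : n + 1 ≤ j))]
          exact List.getElem?_set_ne (by omega)
    · rw [if_neg hx, hcast, ih (n + 1) b j]
      by_cases hj : j = n
      · subst hj
        rw [if_neg (by omega), if_neg]
        rintro ⟨-, -, h3⟩
        rw [Nat.sub_self, List.getD_cons_zero] at h3
        omega
      · by_cases hle : n + 1 ≤ j
        · have h1 : j - n = (j - (n + 1)) + 1 := by omega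
          rw [h1, List.getD_cons_succ]
          by_cases hc : j - (n + 1) < xs.length ∧ level ≤ xs.getD (j - (n + 1)) 0
          · rw [if_pos ⟨hle, hc.1, hc.2⟩,
              if_pos ⟨by omega, by simp only [List.length_cons]; omega, hc.2⟩]
          · have hr : ¬ (n ≤ j ∧ j - (n + 1) + 1 < (x :: xs).length ∧
                level ≤ xs.getD (j - (n + 1)) 0) := by
              rintro ⟨-, hb, hcc⟩
              simp only [List.length_cons] at hb
              exact hc ⟨by omega, hcc⟩
            rw [if_neg (fun h => hc ⟨h.2.1, h.2.2⟩), if_neg hr]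
        · rw [if_neg (fun h => hle (by omega)), if_neg (fun h => hle (by omega : n + 1 ≤ j))]

lemma laserBlocks_length (length : Int) (shapes : List Int) (level : Int) :
    (laserBlocks length shapes level).length = length.toNat := by
  unfold laserBlocks
  rw [show (0 : Int) = ((0 : Nat) : Int) from rfl, foldSet_length]
  simp

lemma laserBlocks_get (length : Int) (shapes : List Int) (level : Int)
    (hlev : 1 ≤ level) {j : Nat} (hj : j < length.toNat) :
    (laserBlocks length shapes level)[j]? = some (decide (eSh shapes j < level)) := by
  unfold laserBlocks
  rw [show (0 : Int) = ((0 : Nat) : Int) from rfl, foldSet_get]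
  simp only [Nat.sub_zero]
  have hrep : (List.replicate length.toNat true)[j]? = some true := by simp [hj]
  by_cases hjs : j < shapes.length
  · have hgd : shapes.getD j 0 = shapes[j] := List.getD_eq_getElem shapes 0 hjs
    by_cases hlv : level ≤ shapes[j]
    · rw [if_pos ⟨Nat.zero_le _, hjs, by rw [hgd]; exact hlv⟩]
      have hd : decide (eSh shapes j < level) = false := by
        simp only [eSh, dif_pos hjs, decide_eq_false_iff_not]
        omega
      rw [hd]
      simp only [List.getElem?_set, List.length_replicate]
      simp [hj]
    · rw [if_neg (by rw [hgd]; rintro ⟨-, -, h3⟩; exact hlv h3), hrep]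
      have hd : decide (eSh shapes j < level) = true := by
        simp only [eSh, dif_pos hjs, decide_eq_true_eq]
        omega
      rw [hd]
  · rw [if_neg (by rintro ⟨-, h2, -⟩; exact hjs h2), hrep]
    have hd : decide (eSh shapes j < level) = true := by
      simp only [eSh, dif_neg hjs, decide_eq_true_eq]
      omega
    rw [hd]

-- `blocks` with the appended False, read at Int index ↑k, 0 ≤ k ≤ length
lemma blocksFull_get (length : Int) (shapes : List Int) (level : Int)
    (hlev : 1 ≤ level) {k : Nat} (hk : k ≤ length.toNat) :
    PySem.List.pyGetD (laserBlocks length shapes level ++ [false]) (k : Int) false =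
    if _h : k < length.toNat then decide (eSh shapes k < level) else false := by
  rw [PySem.List.pyGetD_natCast, List.getD_eq_getElem?_getD]
  by_cases h : k < length.toNat
  · rw [List.getElem?_append_left (by rw [laserBlocks_length]; exact h),
      laserBlocks_get length shapes level hlev h, dif_pos h]
    rfl
  · have hk' : k = length.toNat := by omega
    rw [List.getElem?_append_right (by rw [laserBlocks_length]; omega), dif_neg h,
      laserBlocks_length]
    have : k - length.toNat = 0 := by omega
    rw [this]
    rfl

lemma foldl_count_range (p : Nat → Prop) [DecidablePred p] (c : Int) (n : Nat) :
    (List.range n).foldl (fun c k => if p k then c + 1 else c) c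
    = c + ∑ k ∈ Finset.range n, (if p k then (1 : Int) else 0) := by
  induction n generalizing c with
  | zero => simp
  | succ m ih =>
    rw [List.range_succ, List.foldl_append, ih, Finset.sum_range_succ]
    simp only [List.foldl_cons, List.foldl_nil]
    split <;> ring

lemma sum_map_range (g : Nat → Int) (n : Nat) :
    ((List.range n).map g).sum = ∑ k ∈ Finset.range n, g k := by
  induction n with
  | zero => simp
  | succ m ih =>
    rw [List.range_succ, List.map_append, List.sum_append, ih, Finset.sum_range_succ]
    simp

lemma count_interval (a b : Int) (n : Nat) :
    (∑ k ∈ Finset.range n, if a < 1 + (k : Int) ∧ 1 + (k : Int) ≤ b then (1 : Int) else 0)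
    = max 0 (min b (n : Int) - max a 0) := by
  induction n with
  | zero => simp
  | succ m ih =>
    rw [Finset.sum_range_succ, ih]
    push_cast
    split <;> omega

-- A's inner loop for one level, 1 ≤ level ≤ height
lemma inner_loop (height length : Int) (shapes : List Int) (level : Int)
    (h1 : 1 ≤ level) (h2 : level ≤ height) (c : Int) :
    (PySem.List.pyRange 0 length 1).foldl
      (fun c jdx =>
        if PySem.List.pyGetD (laserBlocks length shapes level ++ [false]) jdx false = true ∧
           PySem.List.pyGetD (laserBlocks length shapes level ++ [false]) (jdx + 1) false = false
        then c + 1 else c) c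
    = c + ∑ j ∈ Finset.range length.toNat,
        (if eSh shapes j < level ∧ level ≤ nSh height length.toNat shapes j then (1 : Int) else 0) := by
  rw [PySem.List.pyRange_one, List.foldl_map]
  have hlen : (length - 0).toNat = length.toNat := by simp
  rw [hlen, foldl_count_range]
  congr 1
  refine Finset.sum_congr rfl (fun k hk => ?_)
  rw [Finset.mem_range] at hk
  have e0 : (0 : Int) + (k : Int) = ((k : Nat) : Int) := by ring
  have e0' : (0 : Int) + (k : Int) + 1 = (((k + 1) : Nat) : Int) := by push_cast; ring
  rw [e0]
  have e1 : (k : Int) + 1 = (((k + 1) : Nat) : Int) := by push_cast; ring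
  rw [e1, blocksFull_get length shapes level h1 (Nat.le_of_lt hk),
    blocksFull_get length shapes level h1 (by omega), dif_pos hk]
  refine if_congr ?_ rfl rfl
  by_cases h3 : k + 1 < length.toNat
  · rw [dif_pos h3]
    simp only [nSh, h3, if_pos, decide_eq_true_eq, decide_eq_false_iff_not]
    omega
  · rw [dif_neg h3]
    simp only [nSh, h3, decide_eq_true_eq]
    constructor
    · rintro ⟨ha, -⟩; exact ⟨ha, h2⟩
    · rintro ⟨ha, -⟩; exact ⟨ha, trivial⟩

-- A equals the closed form whenever 0 ≤ height
lemma laser_count_eq_target (height length : Int) (shapes : List Int) (h0 : 0 ≤ height) :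
    laser_count height length shapes = lcTarget height length shapes := by
  unfold laser_count
  simp only []
  rw [PySem.List.foldl_congr_mem _ _
    (fun count level => count + ∑ j ∈ Finset.range length.toNat,
        (if eSh shapes j < level ∧ level ≤ nSh height length.toNat shapes j then (1 : Int) else 0)) 0
    (by
      intro acc lvl hlvl
      rw [List.mem_reverse, PySem.List.mem_pyRange_one] at hlvl
      exact inner_loop height length shapes lvl (by omega) (by omega) acc)]
  rw [PySem.List.foldl_add, List.map_reverse, List.sum_reverse, zero_add,
    PySem.List.pyRange_one]
  have h11 : height + 1 - 1 = height := by ring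
  rw [h11, List.map_map, sum_map_range]
  simp only [Function.comp_apply]
  rw [Finset.sum_comm]
  unfold lcTarget
  refine Finset.sum_congr rfl (fun j _ => ?_)
  have hci := count_interval (eSh shapes j) (nSh height length.toNat shapes j) height.toNat
  rw [Int.toNat_of_nonneg h0] at hci
  rw [← hci]

-- B equals the closed form on the nontrivial branch
lemma laser_count_alt_eq_target (height length : Int) (shapes : List Int)
    (h1 : 1 ≤ height) (h2 : 1 ≤ length) :
    laser_count_alt height length shapes = lcTarget height length shapes := by
  unfold laser_count_alt
  rw [if_neg (by omega)]
  simp only []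
  set eff := (PySem.List.pyRange 0 length 1).map
      (fun j => if j < (shapes.length : Int) then PySem.List.pyGetD shapes j 0 else 0) with heffdef
  have hL : ((length.toNat : Nat) : Int) = length := Int.toNat_of_nonneg (by omega)
  have heff : ∀ k : Nat, k < length.toNat → PySem.List.pyGetD eff (k : Int) 0 = eSh shapes k := by
    intro k hk
    rw [heffdef, ← hL, PySem.List.pyGetD_map_pyRange _ _ _ _ hk]
    by_cases hjs : k < shapes.length
    · rw [if_pos (by exact_mod_cast hjs), PySem.List.pyGetD_natCast,
        List.getD_eq_getElem shapes 0 hjs]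
      simp [eSh, hjs]
    · rw [if_neg (by omega)]
      simp [eSh, hjs]
  rw [PySem.List.foldl_add, zero_add, PySem.List.pyRange_one, List.map_map]
  have hlen : (length - 0).toNat = length.toNat := by simp
  rw [hlen, sum_map_range]
  unfold lcTarget
  refine Finset.sum_congr rfl (fun k hk => ?_)
  rw [Finset.mem_range] at hk
  simp only [Function.comp_apply]
  have e0 : (0 : Int) + (k : Int) = ((k : Nat) : Int) := by ring
  rw [e0, heff k hk]
  have hnx : (if (k : Int) + 1 < length then PySem.List.pyGetD eff ((k : Int) + 1) 0 else height)
      = nSh height length.toNat shapes k := by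
    by_cases h3 : k + 1 < length.toNat
    · rw [if_pos (by omega)]
      unfold nSh
      rw [if_pos h3]
      have e1 : (k : Int) + 1 = (((k + 1) : Nat) : Int) := by push_cast; ring
      rw [e1, heff (k + 1) h3]
    · rw [if_neg (by omega)]
      unfold nSh
      rw [if_neg h3]
  rw [hnx]

-- ===== VERDICT (by name: the statement is the Claim_ definition above) =====
theorem laser_count_spec : Claim_equal_laser_count := by
  intro height length shapes _ _
  unfold Spec_laser_count
  by_cases hh : height ≤ 0
  · have hA : laser_count height length shapes = 0 := by
      unfold laser_count
      rw [PySem.List.pyRange_one_eq_nil (show height + 1 ≤ 1 by omega)]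
      rfl
    rw [hA, laser_count_alt, if_pos (Or.inl hh)]
  · rw [not_le] at hh
    by_cases hl : length ≤ 0
    · rw [laser_count_eq_target height length shapes (by omega),
        laser_count_alt, if_pos (Or.inr hl)]
      unfold lcTarget
      rw [Int.toNat_of_nonpos hl]
      simp
    · rw [laser_count_eq_target height length shapes (by omega),
        laser_count_alt_eq_target height length shapes (by omega) (by omega)]
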